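-- pv_equiv track=rewrite | github.com/Pixaurora/Pythonista-Challenges | 2024-01-binary_clock/one_liner.py | binarify
-- ===== SOURCE A (Python) =====
-- def binarify(time: str):
--     return '\n'.join(
--         map(
--             ''.join,
--             zip(
--                 *[
--                     (
--                         [
--                             (
--                                 ' '
--                                 if char_num in (3, 6) and twos_place == 3 or char_num == 0 and twos_place in (2, 3)
--                                 else str(int(char) >> twos_place & 1)
--                             )
--                             for twos_place in range(4)[::-1]
--                         ]
--                         if char.isnumeric()
--                         else [' '] * 4
--                     )
--                     for char_num, char in enumerate(time)
--                 ]
--             ),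
--         )
--     )
-- ===== SOURCE B (Python) =====
-- def binarify(time: str):
--     if not time:
--         return ''
--     rows = []
--     for twos_place in (3, 2, 1, 0):
--         cells = []
--         for char_num, char in enumerate(time):
--             if not char.isnumeric():
--                 cells.append(' ')
--             elif (char_num in (3, 6) and twos_place == 3) or (char_num == 0 and twos_place in (2, 3)):
--                 cells.append(' ')
--             else:
--                 cells.append(str(int(char) >> twos_place & 1))
--         rows.append(''.join(cells))
--     return '\n'.join(rows)
-- ===== Notes on version B (the rewrite author's own statement) =====
-- stated objective: simpler
-- what changed: B builds the four output rows directly with an outer loop over the bit position and an inner pass over the characters, instead of A's per-character 4-cell columns transposed via zip(*...) and a nested/ conditional comprehension; the empty string is handled by an explicit early return.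
import Mathlib
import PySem

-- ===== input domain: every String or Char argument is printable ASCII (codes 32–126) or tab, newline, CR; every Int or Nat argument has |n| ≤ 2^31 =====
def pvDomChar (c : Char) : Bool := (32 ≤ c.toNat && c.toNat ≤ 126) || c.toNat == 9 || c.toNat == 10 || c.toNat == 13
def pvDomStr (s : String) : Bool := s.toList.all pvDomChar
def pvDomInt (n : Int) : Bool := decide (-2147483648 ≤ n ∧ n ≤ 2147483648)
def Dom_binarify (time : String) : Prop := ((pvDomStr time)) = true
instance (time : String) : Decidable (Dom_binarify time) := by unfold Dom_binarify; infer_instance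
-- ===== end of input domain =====

-- B builds the four output rows directly (outer loop over the bit position) instead of
-- building per-character columns and transposing with zip(*…); same output, simpler shape.

-- ===== PORT A =====

-- char.isnumeric(): exact on the printable-ASCII domain, where it is '0'..'9'
def pvIsNum (c : Char) : Bool := '0' ≤ c && c ≤ '9'

-- str(int(char) >> twos_place & 1) for a single digit char (exact: int('d') = code − 48)
def pvBit (c : Char) (tp : Nat) : Char := Char.ofNat (48 + (((c.toNat - 48) >>> tp) &&& 1))

-- the inner comprehension's cell for a numeric char
def pvCellA (i : Nat) (c : Char) (tp : Nat) : Char :=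
  if ((i == 3 || i == 6) && tp == 3) || (i == 0 && (tp == 2 || tp == 3)) then ' ' else pvBit c tp

-- one column: the per-character list built by A's comprehension
def pvColA (i : Nat) (c : Char) : List Char :=
  if pvIsNum c then ([3, 2, 1, 0] : List Nat).map (pvCellA i c) else [' ', ' ', ' ', ' ']

-- zip(*cols): rows up to the minimum column length (exact contract of Python's zip; zip() with
-- no argument yields nothing, hence [] when cols = [])
def pvZipStar (cols : List (List Char)) : List (List Char) :=
  match (cols.map (·.length)).min? with
  | none => []
  | some n => (List.range n).map (fun r => cols.map (fun col => col.getD r ' '))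

def binarify (time : String) : String :=
  String.intercalate "\n"
    ((pvZipStar ((time.toList.mapIdx pvColA))).map (fun row => String.mk row))

-- ===== PORT B =====

-- one cell of row twos_place at position char_num (Source B's if/elif/else chain)
def pvCellB (i : Nat) (c : Char) (tp : Nat) : Char :=
  if !pvIsNum c then ' '
  else if ((i == 3 || i == 6) && tp == 3) || (i == 0 && (tp == 2 || tp == 3)) then ' '
  else pvBit c tp

def binarify_alt (time : String) : String :=
  if time = "" then ""
  else
    String.intercalate "\n"
      (([3, 2, 1, 0] : List Nat).map (fun tp =>
        String.mk (time.toList.mapIdx (fun i c => pvCellB i c tp))))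

-- ===== PRECONDITION & SPEC =====
def Spec_binarify (time : String) (out : String) : Prop := out = binarify_alt time
instance (time : String) (out : String) : Decidable (Spec_binarify time out) := by unfold Spec_binarify; infer_instance

-- ===== CLAIM (what is proved, stated in full; the proofs are below) =====
def Claim_equal_binarify : Prop := ∀ (time : String), Dom_binarify time → Spec_binarify time (binarify time)

-- ===== LEMMAS AND PROOFS =====

theorem pvColA_length (i : Nat) (c : Char) : (pvColA i c).length = 4 := by
  unfold pvColA; split <;> rfl

theorem map_length_colA (l : List Char) :
    ∀ (g : Nat → Char → List Char), (∀ i c, (g i c).length = 4) →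
      ((l.mapIdx g).map (·.length)) = l.map (fun _ => 4) := by
  induction l with
  | nil => intro g _; rfl
  | cons a t ih =>
      intro g hg
      simp only [List.mapIdx_cons, List.map_cons, hg]
      exact congrArg _ (ih _ (fun i c => hg (i + 1) c))

theorem foldl_min_replicate : ∀ (n : Nat), List.foldl min 4 (List.replicate n (4 : Nat)) = 4
  | 0 => rfl
  | n + 1 => by
      rw [List.replicate_succ, List.foldl_cons]
      simpa using foldl_min_replicate n

theorem min_elim_replicate (n : Nat) :
    ((List.replicate n (4 : Nat)).min?.elim 4 (min 4)) = 4 := by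
  cases n with
  | zero => rfl
  | succ n =>
      rw [List.replicate_succ, List.min?_cons']
      simp only [Option.elim]
      rw [foldl_min_replicate n]
      simp

theorem min?_const_four (l : List Char) (h : l ≠ []) :
    (l.map (fun _ => (4 : Nat))).min? = some 4 := by
  cases l with
  | nil => exact absurd rfl h
  | cons a t =>
      simp [List.map_const', min_elim_replicate]

-- a single row of A's transpose equals B's row for the corresponding bit position
theorem row_eq (l : List Char) (r : Nat) :
    ∀ (g : Nat → Char → List Char) (g' : Nat → Char → Char),
      (∀ i c, (g i c).getD r ' ' = g' i c) →
      ((l.mapIdx g).map (fun col => col.getD r ' ')) = l.mapIdx g' := by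
  induction l with
  | nil => intro g g' _; rfl
  | cons a t ih =>
      intro g g' h
      simp only [List.mapIdx_cons, List.map_cons, h 0 a]
      exact congrArg _ (ih _ _ (fun i c => h (i + 1) c))

theorem cell_eq (i : Nat) (c : Char) (r tp : Nat) (h : tp = 3 - r) (hr : r < 4) :
    (pvColA i c).getD r ' ' = pvCellB i c tp := by
  subst h
  unfold pvColA pvCellB
  by_cases hn : pvIsNum c
  · simp only [hn, if_pos, Bool.not_true, Bool.false_eq_true, if_false]
    interval_cases r <;> rfl
  · simp only [hn, Bool.not_false, if_pos]
    simp only [Bool.not_eq_true] at hn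
    simp
    interval_cases r <;> rfl

theorem toList_ne_nil_of_ne_empty (s : String) (h : s ≠ "") : s.toList ≠ [] := by
  intro hl
  exact h (String.toList_eq_nil_iff.mp hl)

-- ===== VERDICT (by name: the statement is the Claim_ definition above) =====
theorem binarify_spec : Claim_equal_binarify := by
  intro time _
  unfold Spec_binarify binarify binarify_alt
  by_cases h : time = ""
  · subst h; rfl
  · have hl : time.toList ≠ [] := toList_ne_nil_of_ne_empty time h
    rw [if_neg h]
    have hz : pvZipStar (time.toList.mapIdx pvColA) =
        (List.range 4).map (fun r =>
          (time.toList.mapIdx pvColA).map (fun col => col.getD r ' ')) := by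
      unfold pvZipStar
      rw [map_length_colA time.toList pvColA pvColA_length,
          min?_const_four time.toList hl]
    rw [hz]
    have hrange : List.range 4 = [0, 1, 2, 3] := rfl
    rw [hrange]
    simp only [List.map_cons, List.map_nil]
    have h0 := row_eq time.toList 0 pvColA
      (fun i c => pvCellB i c 3) (fun i c => cell_eq i c 0 3 rfl (by omega))
    have h1 := row_eq time.toList 1 pvColA
      (fun i c => pvCellB i c 2) (fun i c => cell_eq i c 1 2 rfl (by omega))
    have h2 := row_eq time.toList 2 pvColA
      (fun i c => pvCellB i c 1) (fun i c => cell_eq i c 2 1 rfl (by omega))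
    have h3 := row_eq time.toList 3 pvColA
      (fun i c => pvCellB i c 0) (fun i c => cell_eq i c 3 0 rfl (by omega))
    rw [h0, h1, h2, h3]
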